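-- pv_equiv track=rewrite | github.com/Siddharth1047/code-till-job | Day-11.py | smallerSum
-- ===== SOURCE A (Python) =====
-- from typing import List
-- from typing import List
--
-- def smallerSum(n: int, arr: List[int]) -> List[int]:
--     result = []
--     for i in range(n):
--         sum = 0
--         for j in range(n):
--             if arr[j] < arr[i]:
--                 sum += arr[j]
--         result.append(sum)
--     return result
-- ===== SOURCE B (Python) =====
-- def smallerSum(n, arr):
--     xs = arr[:max(n, 0)]
--     pre = {}
--     s = 0
--     for v in sorted(xs):
--         if v not in pre:
--             pre[v] = s
--         s += v
--     return [pre[x] for x in xs]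
-- ===== Notes on version B (the rewrite author's own statement) =====
-- stated objective: faster
-- what changed: Replaces the quadratic all-pairs scan by sorting the first n elements once and sweeping a running prefix sum that records, at each distinct value's first occurrence, the sum of all strictly smaller elements; answers are then read off a dictionary.
import Mathlib
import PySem

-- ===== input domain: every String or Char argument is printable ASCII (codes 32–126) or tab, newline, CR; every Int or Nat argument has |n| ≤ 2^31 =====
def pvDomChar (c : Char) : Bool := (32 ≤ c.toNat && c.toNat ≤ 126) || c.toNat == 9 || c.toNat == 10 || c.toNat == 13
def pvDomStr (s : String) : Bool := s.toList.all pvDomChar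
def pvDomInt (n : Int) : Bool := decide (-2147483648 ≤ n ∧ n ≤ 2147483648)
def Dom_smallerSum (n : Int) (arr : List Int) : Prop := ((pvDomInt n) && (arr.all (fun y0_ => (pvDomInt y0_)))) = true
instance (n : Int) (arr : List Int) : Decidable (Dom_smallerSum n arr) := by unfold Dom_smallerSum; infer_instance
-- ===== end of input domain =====

-- B replaces A's quadratic all-pairs scan by one sort of arr[:n] plus a prefix-sum sweep
-- recorded in a dictionary at each value's first occurrence (objective: faster, asymptotic).

-- ===== PORT A =====
-- result = []; for i in range(n): sum = 0; for j in range(n): if arr[j] < arr[i]: sum += arr[j]; result.append(sum)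
def smallerSum (n : Int) (arr : List Int) : List Int :=
  (PySem.List.pyRange 0 n 1).foldl (fun result i =>
    result ++ [(PySem.List.pyRange 0 n 1).foldl (fun s j =>
      if PySem.List.pyGetD arr j 0 < PySem.List.pyGetD arr i 0 then
        s + PySem.List.pyGetD arr j 0 else s) 0]) []

-- ===== PORT B =====
-- xs = arr[:max(n, 0)]; pre = {}; s = 0; for v in sorted(xs): (if v not in pre: pre[v] = s); s += v
-- return [pre[x] for x in xs]   (pre[x] never misses for x in xs; getD 0 is exact there)
def smallerSum_alt (n : Int) (arr : List Int) : List Int :=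
  let xs := PySem.List.slice arr none (some (max n 0))
  let st := (PySem.List.sorted xs (fun v => v)).foldl
      (fun (p : PySem.Dict Int Int × Int) v =>
        (if p.1.contains v then p.1 else p.1.insert v p.2, p.2 + v))
      (PySem.Dict.empty, 0)
  xs.map (fun x => st.1.getD x 0)

-- ===== PRECONDITION & SPEC =====
-- A indexes arr[j] for all j < n, so it raises IndexError exactly when n > len(arr).
def Pre_smallerSum (n : Int) (arr : List Int) : Prop := n ≤ (arr.length : Int)
instance (n : Int) (arr : List Int) : Decidable (Pre_smallerSum n arr) := by unfold Pre_smallerSum; infer_instance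
def pvWitness_smallerSum : Int × List Int := (2, [3, 1])

def Spec_smallerSum (n : Int) (arr : List Int) (out : List Int) : Prop := out = smallerSum_alt n arr
instance (n : Int) (arr : List Int) (out : List Int) : Decidable (Spec_smallerSum n arr out) := by unfold Spec_smallerSum; infer_instance

-- ===== CLAIM (what is proved, stated in full; the proofs are below) =====
def Claim_equal_smallerSum : Prop := ∀ (n : Int) (arr : List Int), Dom_smallerSum n arr → Pre_smallerSum n arr → Spec_smallerSum n arr (smallerSum n arr)

-- ===== LEMMAS AND PROOFS =====

-- the common mathematical value: each element of xs mapped to the sum of strictly smaller elements of xs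
def pvSmaller (xs : List Int) : List Int :=
  xs.map (fun v => (xs.filter (fun y => decide (y < v))).sum)

-- invariant of B's dictionary-building sweep over a nondecreasing list
theorem pv_loopInv (l : List Int) (h : l.Pairwise (· ≤ ·)) :
    (∀ x, ((l.foldl (fun (p : PySem.Dict Int Int × Int) v =>
        (if p.1.contains v then p.1 else p.1.insert v p.2, p.2 + v))
        (PySem.Dict.empty, 0)).1.contains x = true → x ∈ l)) ∧
    (l.foldl (fun (p : PySem.Dict Int Int × Int) v =>
        (if p.1.contains v then p.1 else p.1.insert v p.2, p.2 + v))
        (PySem.Dict.empty, 0)).2 = l.sum ∧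
    ∀ x ∈ l, ((l.foldl (fun (p : PySem.Dict Int Int × Int) v =>
        (if p.1.contains v then p.1 else p.1.insert v p.2, p.2 + v))
        (PySem.Dict.empty, 0)).1.get? x = some ((l.filter (fun y => decide (y < x))).sum)) := by
  induction l using List.reverseRecOn with
  | nil =>
    refine ⟨?_, rfl, ?_⟩
    · intro x hx
      simp [PySem.Dict.empty, PySem.Dict.contains] at hx
    · intro x hx
      simp at hx
  | append_singleton l v ih =>
    rw [List.pairwise_append] at h
    obtain ⟨hl, -, hlast⟩ := h
    have hle : ∀ a ∈ l, a ≤ v := fun a ha => hlast a ha v (by simp)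
    obtain ⟨ihc, ihs, ihg⟩ := ih hl
    simp only [List.foldl_append, List.foldl_cons, List.foldl_nil]
    refine ⟨?_, ?_, ?_⟩
    · intro x hx
      split_ifs at hx with hcv
      · exact List.mem_append_left _ (ihc x hx)
      · rw [PySem.Dict.contains_insert] at hx
        rcases Bool.or_eq_true_iff.1 hx with h1 | h2
        · exact List.mem_append_right _ (by simp [eq_of_beq h1])
        · exact List.mem_append_left _ (ihc x h2)
    · rw [ihs, List.sum_append]
      simp
    · intro x hx
      rw [List.filter_append, List.sum_append]
      by_cases hxl : x ∈ l
      · have hxv : x ≤ v := hle x hxl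
        have hfv : [v].filter (fun y => decide (y < x)) = [] := by
          simp [show ¬ (v < x) by omega]
        rw [hfv]
        simp only [List.sum_nil, add_zero]
        split_ifs with hcv
        · exact ihg x hxl
        · have hne : x ≠ v := by
            rintro rfl
            have hnone : (l.foldl (fun (p : PySem.Dict Int Int × Int) v =>
                (if p.1.contains v then p.1 else p.1.insert v p.2, p.2 + v))
                (PySem.Dict.empty, 0)).1.get? x = none :=
              (PySem.Dict.get?_eq_none_iff_contains _ _).2 (by simpa using hcv)
            rw [ihg x hxl] at hnone
            exact Option.some_ne_none _ hnone
          rw [PySem.Dict.get?_insert_of_ne _ _ hne]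
          exact ihg x hxl
      · have hxv : x = v := by
          rcases List.mem_append.1 hx with h1 | h2
          · exact absurd h1 hxl
          · simpa using h2
        subst hxv
        have hcv : (l.foldl (fun (p : PySem.Dict Int Int × Int) v =>
            (if p.1.contains v then p.1 else p.1.insert v p.2, p.2 + v))
            (PySem.Dict.empty, 0)).1.contains x = false := by
          cases hb : (l.foldl (fun (p : PySem.Dict Int Int × Int) v =>
              (if p.1.contains v then p.1 else p.1.insert v p.2, p.2 + v))
              (PySem.Dict.empty, 0)).1.contains x
          · rfl
          · exact absurd (ihc x hb) hxl
        rw [if_neg (by simp [hcv])]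
        rw [PySem.Dict.get?_insert_self]
        have hfl : l.filter (fun y => decide (y < x)) = l :=
          List.filter_eq_self.2 (fun a ha => by
            have h1 : a ≤ x := hle a ha
            have h2 : a ≠ x := fun he => hxl (he ▸ ha)
            simp only [decide_eq_true_eq]
            omega)
        have hfv : [x].filter (fun y => decide (y < x)) = [] := by simp
        rw [hfl, hfv, ihs]
        simp

-- A computes pvSmaller (arr.take n.toNat) when 0 ≤ n ≤ len arr
theorem pv_A_char (n : Int) (arr : List Int) (h0 : 0 ≤ n) (hle : n ≤ (arr.length : Int)) :
    smallerSum n arr = pvSmaller (arr.take n.toNat) := by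
  unfold smallerSum pvSmaller
  rw [PySem.List.foldl_append_singleton_eq_map, List.nil_append]
  set xs := arr.take n.toNat with hxs
  have hxlen : (xs.length : Int) = n := by
    rw [hxs, List.length_take]
    omega
  have hlen' : PySem.List.len xs = n := by
    simpa [PySem.List.len] using hxlen
  have hget : ∀ j : Int, 0 ≤ j → j < n →
      PySem.List.pyGetD arr j 0 = PySem.List.pyGetD xs j 0 := by
    intro j hj0 hjn
    have h1 : j < (arr.length : Int) := lt_of_lt_of_le hjn hle
    have h2 : j < (xs.length : Int) := by rw [hxlen]; exact hjn
    rw [PySem.List.pyGetD_eq_getElem arr 0 hj0 h1,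
        PySem.List.pyGetD_eq_getElem xs 0 hj0 h2]
    simp [hxs, List.getElem_take]
  have hinner : ∀ V : Int,
      (PySem.List.pyRange 0 n 1).foldl
        (fun s j => if PySem.List.pyGetD arr j 0 < V then s + PySem.List.pyGetD arr j 0 else s) 0
      = (xs.filter (fun y => decide (y < V))).sum := by
    intro V
    rw [PySem.List.foldl_congr_mem (PySem.List.pyRange 0 n 1)
          (fun s j => if PySem.List.pyGetD arr j 0 < V then s + PySem.List.pyGetD arr j 0 else s)
          (fun s j => if PySem.List.pyGetD xs j 0 < V then s + PySem.List.pyGetD xs j 0 else s)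
          0 (by
            intro acc j hj
            obtain ⟨hj0, hjn⟩ := PySem.List.mem_pyRange_one.1 hj
            simp only [hget j hj0 hjn])]
    rw [← hlen']
    rw [PySem.List.foldl_pyRange_zero_pyGetD xs 0 (fun s y => if y < V then s + y else s) 0]
    rw [PySem.List.foldl_ite_eq_foldl_filter (fun y => y < V) (fun s y => s + y)]
    rw [PySem.List.foldl_add _ (fun y => y) 0]
    simp
  have hmap : (PySem.List.pyRange 0 n 1).map
      (fun i => (PySem.List.pyRange 0 n 1).foldl
        (fun s j => if PySem.List.pyGetD arr j 0 < PySem.List.pyGetD arr i 0 then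
            s + PySem.List.pyGetD arr j 0 else s) 0)
      = (PySem.List.pyRange 0 n 1).map
      (fun i => (xs.filter (fun y => decide (y < PySem.List.pyGetD xs i 0))).sum) := by
    apply List.map_congr_left
    intro i hi
    obtain ⟨hi0, hin⟩ := PySem.List.mem_pyRange_one.1 hi
    rw [hget i hi0 hin] at *
    exact hinner (PySem.List.pyGetD xs i 0)
  rw [hmap, ← hlen']
  rw [show (fun i => (xs.filter (fun y => decide (y < PySem.List.pyGetD xs i 0))).sum)
      = (fun v => (xs.filter (fun y => decide (y < v))).sum) ∘
        (fun i => PySem.List.pyGetD xs i 0) from rfl]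
  rw [← List.map_map, PySem.List.map_pyGetD_pyRange_zero]

-- B computes pvSmaller (arr.take n.toNat) when 0 ≤ n
theorem pv_B_char (n : Int) (arr : List Int) (_h0 : 0 ≤ n) :
    smallerSum_alt n arr = pvSmaller (arr.take n.toNat) := by
  have hmax : max n 0 = ((n.toNat : Nat) : Int) := by omega
  unfold smallerSum_alt
  rw [hmax, PySem.List.slice_to_natCast]
  have hperm : (PySem.List.sorted (arr.take n.toNat) (fun v => v)).Perm (arr.take n.toNat) :=
    PySem.List.sorted_perm (arr.take n.toNat) (fun v => v) false
  have hpair : (PySem.List.sorted (arr.take n.toNat) (fun v => v)).Pairwise (· ≤ ·) := by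
    simpa using PySem.List.sorted_pairwise (arr.take n.toNat) (fun v => v)
  obtain ⟨-, -, hg⟩ := pv_loopInv (PySem.List.sorted (arr.take n.toNat) (fun v => v)) hpair
  unfold pvSmaller
  apply List.map_congr_left
  intro x hx
  have hxs : x ∈ PySem.List.sorted (arr.take n.toNat) (fun v => v) := hperm.mem_iff.2 hx
  have hgd : ∀ (d : PySem.Dict Int Int) (k : Int), d.getD k 0 = (d.get? k).getD 0 :=
    fun d k => rfl
  rw [hgd, hg x hxs]
  simp only [Option.getD_some]
  exact ((hperm.filter _).sum_eq)

theorem pv_neg (n : Int) (arr : List Int) (h : n < 0) :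
    smallerSum n arr = [] ∧ smallerSum_alt n arr = [] := by
  constructor
  · unfold smallerSum
    rw [PySem.List.pyRange_one_eq_nil (by omega)]
    rfl
  · unfold smallerSum_alt
    rw [show max n 0 = ((0 : Nat) : Int) by omega, PySem.List.slice_to_natCast]
    simp

-- ===== VERDICT (by name: the statement is the Claim_ definition above) =====
theorem smallerSum_spec : Claim_equal_smallerSum := by
  intro n arr _ hpre
  unfold Spec_smallerSum
  rcases lt_or_ge n 0 with h | h
  · rw [(pv_neg n arr h).1, (pv_neg n arr h).2]
  · rw [pv_A_char n arr h hpre, pv_B_char n arr h]
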